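-- pv_equiv track=rewrite | github.com/ddoddii/algorithm | python/Problems/company/onboarding_in_python/#7.py | solution
-- ===== SOURCE A (Python) =====
-- def getUserFriend(friends, user):
--     usr_friend = []
--
--     for friend in friends:
--         a = friend[0]
--         b = friend[1]
--
--         if a == user:
--             usr_friend.append(b)
--         if b == user:
--             usr_friend.append(a)
--     return usr_friend
--
-- def getFriendScore(friends, usr_friend, user):
--
--     friend_score = {}
--
--     for friend in friends:
--         a = friend[0]
--         b = friend[1]
--
--         if a in usr_friend and b != user:
--             friend_score[b] = friend_score.get(b,0) + 10
--         if b in usr_friend and a != user: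
--             friend_score[a] = friend_score.get(a,0) + 10
--
--     return friend_score
--
-- def updateFriendScore(visitors, usr_friend, friend_score):
--
--     for visitor in visitors:
--         if visitor not in usr_friend:
--             try:
--                 friend_score[visitor] += 1
--             except KeyError:
--                 friend_score[visitor] = 1
--
--     return friend_score
--
-- def solution(user, friends, visitors):
--
--     usr_friend = getUserFriend(friends, user)
--     friend_score = getFriendScore(friends, usr_friend, user)
--     visitor_friend_score = updateFriendScore(visitors, usr_friend, friend_score)
--
--     recommend_friend_score = {name : score for name , score in visitor_friend_score.items() if name not in usr_friend and name != user}
--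
--     topFriend = []
--     for name, score in recommend_friend_score.items():
--         if score > 0:
--             topFriend.append((name, score))
--
--     topFriend.sort(key=lambda x: (-x[1], x[0]))
--
--     answer = [name for name, _ in topFriend]
--     return answer
-- ===== SOURCE B (Python) =====
-- def solution(user, friends, visitors):
--     # Build an adjacency map once (lists, so duplicate edges keep their multiplicity),
--     # then score each neighbour of the user's friends instead of re-scanning the edge list.
--     adj = {}
--     for a, b in friends:
--         for x, y in ((a, b), (b, a)):
--             adj.setdefault(x, []).append(y)
--
--     usr_friend = adj.get(user, [])
--
--     score = {}
--     for f in dict.fromkeys(usr_friend):   # each distinct friend once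
--         for n in adj[f]:
--             if n != user:
--                 score[n] = score.get(n, 0) + 10
--
--     for v in visitors:
--         if v not in usr_friend:
--             score[v] = score.get(v, 0) + 1
--
--     cand = [(n, s) for n, s in score.items() if n not in usr_friend and n != user]
--     cand.sort(key=lambda x: (-x[1], x[0]))
--     return [n for n, _ in cand]
-- ===== Notes on version B (the rewrite author's own statement) =====
-- stated objective: alternative
-- what changed: B replaces A's repeated membership-scan over the edge list with an adjacency map built in one pass: scores come from walking each distinct friend's neighbour list, and the always-true score>0 pass and the dict-comprehension rebuild are dropped.
import Mathlib
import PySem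

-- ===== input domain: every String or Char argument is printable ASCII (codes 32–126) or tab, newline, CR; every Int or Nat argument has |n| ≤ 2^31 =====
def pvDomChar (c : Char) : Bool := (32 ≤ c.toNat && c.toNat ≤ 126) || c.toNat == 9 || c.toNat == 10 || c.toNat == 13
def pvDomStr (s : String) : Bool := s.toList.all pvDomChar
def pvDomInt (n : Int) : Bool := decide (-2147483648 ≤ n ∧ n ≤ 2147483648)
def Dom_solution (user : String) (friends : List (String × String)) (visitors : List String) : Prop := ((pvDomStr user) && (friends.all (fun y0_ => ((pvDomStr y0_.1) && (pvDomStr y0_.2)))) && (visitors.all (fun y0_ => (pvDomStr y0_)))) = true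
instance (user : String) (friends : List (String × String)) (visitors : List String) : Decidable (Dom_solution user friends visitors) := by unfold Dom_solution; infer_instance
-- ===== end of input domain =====

-- B replaces A's repeated edge-list membership scans by an adjacency map built once;
-- same results, proved equal on every input (objective: alternative decomposition).

-- ===== PORT A =====
def getUserFriend (friends : List (String × String)) (user : String) : List String :=
  friends.foldl (fun usr_friend friend =>
    let a := friend.1
    let b := friend.2
    let usr_friend := if a == user then usr_friend ++ [b] else usr_friend
    let usr_friend := if b == user then usr_friend ++ [a] else usr_friend
    usr_friend) []

def getFriendScore (friends : List (String × String)) (usr_friend : List String) (user : String) : PySem.Dict String Int :=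
  friends.foldl (fun friend_score friend =>
    let a := friend.1
    let b := friend.2
    let friend_score := if usr_friend.contains a && b != user then
        friend_score.insert b (friend_score.getD b 0 + 10) else friend_score
    let friend_score := if usr_friend.contains b && a != user then
        friend_score.insert a (friend_score.getD a 0 + 10) else friend_score
    friend_score) PySem.Dict.empty

def updateFriendScore (visitors : List String) (usr_friend : List String) (friend_score : PySem.Dict String Int) : PySem.Dict String Int :=
  visitors.foldl (fun friend_score visitor =>
    if !(usr_friend.contains visitor) then
      -- try: friend_score[visitor] += 1 ; except KeyError: friend_score[visitor] = 1
      if friend_score.contains visitor then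
        friend_score.insert visitor (friend_score.getD visitor 0 + 1)
      else
        friend_score.insert visitor 1
    else friend_score) friend_score

def solution (user : String) (friends : List (String × String)) (visitors : List String) : List String :=
  let usr_friend := getUserFriend friends user
  let friend_score := getFriendScore friends usr_friend user
  let visitor_friend_score := updateFriendScore visitors usr_friend friend_score
  -- {name : score for name, score in visitor_friend_score.items() if name not in usr_friend and name != user}
  let recommend_friend_score :=
    (visitor_friend_score.items.filter
        (fun p => !(usr_friend.contains p.1) && p.1 != user)).foldl
      (fun d p => d.insert p.1 p.2) (PySem.Dict.empty : PySem.Dict String Int)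
  let topFriend := recommend_friend_score.items.foldl
    (fun acc p => if 0 < p.2 then acc ++ [(p.1, p.2)] else acc) []
  let topFriend := PySem.List.sorted2 topFriend (fun x => -x.2) (fun x => x.1)
  topFriend.map (fun p => p.1)

-- ===== PORT B =====
def solution_alt (user : String) (friends : List (String × String)) (visitors : List String) : List String :=
  let adj : PySem.Dict String (List String) :=
    friends.foldl (fun adj p =>
      [(p.1, p.2), (p.2, p.1)].foldl
        (fun adj q => adj.modify q.1 [] (fun l => l ++ [q.2])) adj)
      PySem.Dict.empty
  let usr_friend := adj.getD user []
  -- adj[f] for f in usr_friend: every such f is a key of adj, so Python's adj[f]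
  -- never raises and getD is exact here
  let score : PySem.Dict String Int :=
    (PySem.List.dedup usr_friend).foldl (fun score f =>
      (adj.getD f []).foldl (fun score n =>
        if n != user then score.insert n (score.getD n 0 + 10) else score) score)
      PySem.Dict.empty
  let score := visitors.foldl (fun score v =>
    if !(usr_friend.contains v) then score.insert v (score.getD v 0 + 1) else score) score
  let cand := score.items.filter (fun p => !(usr_friend.contains p.1) && p.1 != user)
  let cand := PySem.List.sorted2 cand (fun x => -x.2) (fun x => x.1)
  cand.map (fun p => p.1)

-- ===== PRECONDITION & SPEC =====
def Spec_solution (user : String) (friends : List (String × String)) (visitors : List String) (out : List String) : Prop := out = solution_alt user friends visitors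
instance (user : String) (friends : List (String × String)) (visitors : List String) (out : List String) : Decidable (Spec_solution user friends visitors out) := by unfold Spec_solution; infer_instance

-- ===== CLAIM (what is proved, stated in full; the proofs are below) =====
def Claim_equal_solution : Prop := ∀ (user : String) (friends : List (String × String)) (visitors : List String), Dom_solution user friends visitors → Spec_solution user friends visitors (solution user friends visitors)

-- ===== LEMMAS AND PROOFS =====

-- Proof-side vocabulary: both score dictionaries are folds of conditional "+w bumps"
-- over a list of (condition, key) instructions.
def pvBump (w : Int) (d : PySem.Dict String Int) (i : Bool × String) : PySem.Dict String Int :=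
  if i.1 then d.insert i.2 (d.getD i.2 0 + w) else d

-- every edge in both directions
def pvEdges (friends : List (String × String)) : List (String × String) :=
  friends.flatMap (fun p => [(p.1, p.2), (p.2, p.1)])

def pvCnt (l : List (Bool × String)) (n : String) : Nat :=
  l.countP (fun i => i.1 && i.2 == n)

lemma pv_bumpFold_get? (w : Int) (l : List (Bool × String)) (n : String) :
    ∀ d : PySem.Dict String Int,
      (l.foldl (pvBump w) d).get? n
        = if pvCnt l n = 0 then d.get? n
          else some (d.getD n 0 + w * (pvCnt l n : Int)) := by
  induction l with
  | nil => intro d; simp [pvCnt]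
  | cons i t ih =>
    intro d
    obtain ⟨c, k⟩ := i
    by_cases hc : c
    · have hb : pvBump w d (c, k) = d.insert k (d.getD k 0 + w) := by
        simp [pvBump, hc]
      by_cases hk : k = n
      · subst hk
        have hcnt : pvCnt ((c, k) :: t) k = pvCnt t k + 1 := by
          simp [pvCnt, hc]
        have h1 : (d.insert k (d.getD k 0 + w)).get? k = some (d.getD k 0 + w) :=
          PySem.Dict.get?_insert_self d k _
        have h2 : (d.insert k (d.getD k 0 + w)).getD k 0 = d.getD k 0 + w := by
          rw [PySem.Dict.getD_insert]
          simp
        rw [List.foldl_cons, hb, ih, hcnt, if_neg (by omega : ¬(pvCnt t k + 1 = 0))]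
        by_cases ht : pvCnt t k = 0
        · rw [if_pos ht, h1, ht]
          norm_num
        · rw [if_neg ht, h2]
          congr 1
          push_cast
          ring
      · have hcnt : pvCnt ((c, k) :: t) n = pvCnt t n := by
          simp [pvCnt, hk]
        have h1 : (d.insert k (d.getD k 0 + w)).get? n = d.get? n :=
          PySem.Dict.get?_insert_of_ne d _ (fun h => hk h.symm)
        have h2 : (d.insert k (d.getD k 0 + w)).getD n 0 = d.getD n 0 := by
          rw [PySem.Dict.getD_insert, if_neg (fun h : n = k => hk h.symm)]
        rw [List.foldl_cons, hb, ih, hcnt, h1, h2]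
    · have hb : pvBump w d (c, k) = d := by simp [pvBump, hc]
      have hcnt : pvCnt ((c, k) :: t) n = pvCnt t n := by
        simp [pvCnt, hc]
      rw [List.foldl_cons, hb, ih, hcnt]

lemma pv_bumpFold_nodup (w : Int) (l : List (Bool × String)) :
    ∀ d : PySem.Dict String Int, d.keys.Nodup → (l.foldl (pvBump w) d).keys.Nodup := by
  induction l with
  | nil => intro d h; exact h
  | cons i t ih =>
    intro d h
    rw [List.foldl_cons]
    apply ih
    unfold pvBump
    split
    · exact PySem.Dict.nodup_keys_insert _ _ _ h
    · exact h

-- the canonical usr_friend list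
def pvUF (user : String) (friends : List (String × String)) : List String :=
  ((pvEdges friends).filter (fun e => e.1 == user)).map (fun e => e.2)

lemma pv_ufA (user : String) (friends : List (String × String)) :
    getUserFriend friends user = pvUF user friends := by
  unfold getUserFriend pvUF
  suffices h : ∀ init : List String,
      friends.foldl (fun usr_friend friend =>
        let a := friend.1
        let b := friend.2
        let usr_friend := if a == user then usr_friend ++ [b] else usr_friend
        let usr_friend := if b == user then usr_friend ++ [a] else usr_friend
        usr_friend) init
      = init ++ ((pvEdges friends).filter (fun e => e.1 == user)).map (fun e => e.2) by
    simpa using h []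
  induction friends with
  | nil => intro init; simp [pvEdges]
  | cons p t ih =>
    intro init
    rw [List.foldl_cons]
    rw [ih]
    simp only [pvEdges, List.flatMap_cons, List.filter_append, List.map_append]
    by_cases h1 : p.1 == user <;> by_cases h2 : p.2 == user <;>
      simp [h1, h2, List.append_assoc]

-- the adjacency fold of B, over the doubled edge list
def pvAdj (friends : List (String × String)) : PySem.Dict String (List String) :=
  (pvEdges friends).foldl (fun adj q => adj.modify q.1 [] (fun l => l ++ [q.2]))
    PySem.Dict.empty

lemma pv_adjB (friends : List (String × String)) :
    friends.foldl (fun adj p =>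
      [(p.1, p.2), (p.2, p.1)].foldl
        (fun adj q => adj.modify q.1 [] (fun l => l ++ [q.2])) adj)
      PySem.Dict.empty = pvAdj friends := by
  unfold pvAdj
  suffices h : ∀ d : PySem.Dict String (List String),
      friends.foldl (fun adj p =>
        [(p.1, p.2), (p.2, p.1)].foldl
          (fun adj q => adj.modify q.1 [] (fun l => l ++ [q.2])) adj) d
      = (pvEdges friends).foldl (fun adj q => adj.modify q.1 [] (fun l => l ++ [q.2])) d from
    h _
  induction friends with
  | nil => intro d; rfl
  | cons p t ih =>
    intro d
    rw [List.foldl_cons]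
    rw [ih]
    simp [pvEdges, List.flatMap_cons]

lemma pv_adj_getD (friends : List (String × String)) (c : String) :
    (pvAdj friends).getD c []
      = ((pvEdges friends).filter (fun e => e.1 == c)).map (fun e => e.2) := by
  unfold pvAdj
  rw [PySem.Dict.getD_foldl_modify_append]
  simp [PySem.Dict.getD_eq_get?_getD, PySem.Dict.get?_empty]

-- A's score pass as a bump fold
def pvInstrA (user : String) (U : List String) (friends : List (String × String)) :
    List (Bool × String) :=
  (pvEdges friends).map (fun e => (U.contains e.1 && e.2 != user, e.2))

lemma pv_scoreA (friends : List (String × String)) (U : List String) (user : String) :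
    getFriendScore friends U user
      = (pvInstrA user U friends).foldl (pvBump 10) PySem.Dict.empty := by
  unfold getFriendScore pvInstrA
  suffices h : ∀ d : PySem.Dict String Int,
      friends.foldl (fun friend_score friend =>
        let a := friend.1
        let b := friend.2
        let friend_score := if U.contains a && b != user then
            friend_score.insert b (friend_score.getD b 0 + 10) else friend_score
        let friend_score := if U.contains b && a != user then
            friend_score.insert a (friend_score.getD a 0 + 10) else friend_score
        friend_score) d
      = ((pvEdges friends).map (fun e => (U.contains e.1 && e.2 != user, e.2))).foldl
          (pvBump 10) d from h _
  induction friends with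
  | nil => intro d; rfl
  | cons p t ih =>
    intro d
    rw [List.foldl_cons]
    rw [ih]
    simp [pvEdges, List.flatMap_cons, pvBump]

-- B's score pass as a bump fold
def pvInstrB (user : String) (fs : List String) (friends : List (String × String)) :
    List (Bool × String) :=
  fs.flatMap (fun f => ((pvAdj friends).getD f []).map (fun y => (y != user, y)))

lemma pv_inner (user : String) (ns : List String) :
    ∀ d : PySem.Dict String Int,
      ns.foldl (fun score n =>
        if n != user then score.insert n (score.getD n 0 + 10) else score) d
      = (ns.map (fun y => ((y != user : Bool), y))).foldl (pvBump 10) d := by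
  intro d
  rw [List.foldl_map]
  rfl

lemma pv_scoreB (user : String) (friends : List (String × String)) (fs : List String) :
    ∀ d : PySem.Dict String Int,
      fs.foldl (fun score f =>
        ((pvAdj friends).getD f []).foldl (fun score n =>
          if n != user then score.insert n (score.getD n 0 + 10) else score) score) d
      = (pvInstrB user fs friends).foldl (pvBump 10) d := by
  induction fs with
  | nil => intro d; rfl
  | cons f t ih =>
    intro d
    rw [List.foldl_cons, ih]
    simp only [pvInstrB, List.flatMap_cons, List.foldl_append]
    rw [pv_inner]

-- the visitor pass as a bump fold
def pvInstrV (U : List String) (visitors : List String) : List (Bool × String) :=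
  visitors.map (fun v => ((!(U.contains v) : Bool), v))

lemma pv_visA (visitors U : List String) (d : PySem.Dict String Int) :
    updateFriendScore visitors U d = (pvInstrV U visitors).foldl (pvBump 1) d := by
  unfold updateFriendScore pvInstrV
  rw [List.foldl_map]
  congr 1
  funext d v
  by_cases hu : v ∈ U
  · simp [pvBump, hu]
  · by_cases hc : d.contains v
    · simp [pvBump, hu, hc]
    · have hc' : d.contains v = false := by simpa using hc
      have h0 : d.getD v 0 = 0 := by
        rw [PySem.Dict.getD_eq_get?_getD,
          (PySem.Dict.get?_eq_none_iff_contains d v).mpr hc']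
        rfl
      simp [pvBump, hu, hc', h0]

lemma pv_visB (visitors U : List String) (d : PySem.Dict String Int) :
    visitors.foldl (fun score v =>
      if !(U.contains v) then score.insert v (score.getD v 0 + 1) else score) d
    = (pvInstrV U visitors).foldl (pvBump 1) d := by
  unfold pvInstrV
  rw [List.foldl_map]
  rfl

-- counting: countP splits over a pointwise-disjoint disjunction
lemma pv_countP_or (l : List (String × String)) (p q : String × String → Bool)
    (h : ∀ x, ¬(p x = true ∧ q x = true)) :
    l.countP (fun x => p x || q x) = l.countP p + l.countP q := by
  induction l with
  | nil => simp
  | cons a t ih =>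
    simp only [List.countP_cons, ih]
    by_cases hp : p a = true <;> by_cases hq : q a = true
    · exact absurd ⟨hp, hq⟩ (h a)
    · simp [hp, hq]; omega
    · simp [hp, hq]; omega
    · simp [hp, hq]

-- summing the per-friend fibre counts over a duplicate-free list of sources
lemma pv_sum_fiber (edges : List (String × String)) (r : String × String → Bool) :
    ∀ fs : List String, fs.Nodup →
      (fs.map (fun f => edges.countP (fun e => e.1 == f && r e))).sum
        = edges.countP (fun e => fs.contains e.1 && r e) := by
  intro fs
  induction fs with
  | nil => intro _; simp
  | cons f rest ih =>
    intro hnd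
    have hfr : f ∉ rest := by
      intro hmem; exact (List.nodup_cons.mp hnd).1 hmem
    rw [List.map_cons, List.sum_cons, ih (List.nodup_cons.mp hnd).2]
    have hdisj : ∀ x : String × String,
        ¬((x.1 == f && r x) = true ∧ (rest.contains x.1 && r x) = true) := by
      intro x ⟨h1, h2⟩
      have e1 : x.1 = f := by
        have := h1
        simp only [Bool.and_eq_true, beq_iff_eq] at this
        exact this.1
      have e2 : x.1 ∈ rest := by
        have := h2
        simp only [Bool.and_eq_true] at this
        simpa using this.1
      exact hfr (e1 ▸ e2)
    rw [← pv_countP_or edges _ _ hdisj]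
    apply List.countP_congr
    intro x _
    by_cases h1 : x.1 = f <;> by_cases h2 : x.1 ∈ rest <;> cases hr : r x <;>
      simp [h1, h2]

-- the two instruction lists have the same multiplicity at every key
lemma pv_cnt_eq (user : String) (friends : List (String × String)) (n : String) :
    pvCnt (pvInstrA user (pvUF user friends) friends) n
      = pvCnt (pvInstrB user (PySem.List.dedup (pvUF user friends)) friends) n := by
  set U := pvUF user friends with hU
  set r : String × String → Bool := fun e => e.2 != user && e.2 == n with hr
  have hA : pvCnt (pvInstrA user U friends) n
      = (pvEdges friends).countP (fun e => U.contains e.1 && r e) := by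
    simp only [pvCnt, pvInstrA, List.countP_map]
    apply List.countP_congr
    intro e _
    simp [hr, Function.comp, Bool.and_assoc]
  have hB : pvCnt (pvInstrB user (PySem.List.dedup U) friends) n
      = (pvEdges friends).countP (fun e => U.contains e.1 && r e) := by
    have hsum : ∀ fs : List String,
        pvCnt (pvInstrB user fs friends) n
          = (fs.map (fun f => (pvEdges friends).countP (fun e => e.1 == f && r e))).sum := by
      intro fs
      induction fs with
      | nil => simp [pvCnt, pvInstrB]
      | cons f rest ih =>
        simp only [pvInstrB, List.flatMap_cons, List.map_cons, List.sum_cons, pvCnt,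
          List.countP_append] at ih ⊢
        rw [ih]
        congr 1
        rw [pv_adj_getD, List.countP_map, List.countP_map, List.countP_filter]
        apply List.countP_congr
        intro e _
        simp [hr, Function.comp, Bool.and_comm, Bool.and_left_comm]
    rw [hsum, pv_sum_fiber (pvEdges friends) r (PySem.List.dedup U) (PySem.List.nodup_dedup U)]
    apply List.countP_congr
    intro e _
    have : (PySem.List.dedup U).contains e.1 = U.contains e.1 := by
      by_cases hm : e.1 ∈ U <;>
        simp [hm]
    rw [this]
  rw [hA, hB]

-- the composed two-phase lookup
lemma pv_phase_get? (l10 lv : List (Bool × String)) (n : String) :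
    (lv.foldl (pvBump 1) (l10.foldl (pvBump 10) PySem.Dict.empty)).get? n
      = if pvCnt lv n = 0 then
          (if pvCnt l10 n = 0 then none else some (10 * (pvCnt l10 n : Int)))
        else some (10 * (pvCnt l10 n : Int) + (pvCnt lv n : Int)) := by
  rw [pv_bumpFold_get?]
  rw [pv_bumpFold_get?]
  have hgd : (l10.foldl (pvBump 10) PySem.Dict.empty).getD n 0 = 10 * (pvCnt l10 n : Int) := by
    rw [PySem.Dict.getD_eq_get?_getD, pv_bumpFold_get?]
    by_cases h : pvCnt l10 n = 0
    · simp [h, PySem.Dict.get?_empty]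
    · simp [h, PySem.Dict.getD_eq_get?_getD, PySem.Dict.get?_empty]
  rw [hgd]
  by_cases hv : pvCnt lv n = 0 <;> by_cases h10 : pvCnt l10 n = 0 <;>
    simp [hv, h10, PySem.Dict.get?_empty]

-- the A-side final dictionary and the B-side final dictionary
def pvDictA (user : String) (friends : List (String × String)) (visitors : List String) :
    PySem.Dict String Int :=
  (pvInstrV (pvUF user friends) visitors).foldl (pvBump 1)
    ((pvInstrA user (pvUF user friends) friends).foldl (pvBump 10) PySem.Dict.empty)

def pvDictB (user : String) (friends : List (String × String)) (visitors : List String) :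
    PySem.Dict String Int :=
  (pvInstrV (pvUF user friends) visitors).foldl (pvBump 1)
    ((pvInstrB user (PySem.List.dedup (pvUF user friends)) friends).foldl (pvBump 10)
      PySem.Dict.empty)

lemma pv_get?_AB (user : String) (friends : List (String × String)) (visitors : List String)
    (n : String) :
    (pvDictA user friends visitors).get? n = (pvDictB user friends visitors).get? n := by
  unfold pvDictA pvDictB
  rw [pv_phase_get?, pv_phase_get?, pv_cnt_eq]

lemma pv_pos_A (user : String) (friends : List (String × String)) (visitors : List String)
    (n : String) (v : Int) (h : (pvDictA user friends visitors).get? n = some v) : 0 < v := by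
  unfold pvDictA at h
  rw [pv_phase_get?] at h
  by_cases hv : pvCnt (pvInstrV (pvUF user friends) visitors) n = 0 <;>
    by_cases h10 : pvCnt (pvInstrA user (pvUF user friends) friends) n = 0 <;>
      simp [hv, h10] at h <;> omega

lemma pv_nodup_A (user : String) (friends : List (String × String)) (visitors : List String) :
    (pvDictA user friends visitors).keys.Nodup := by
  unfold pvDictA
  exact pv_bumpFold_nodup _ _ _ (pv_bumpFold_nodup _ _ _ PySem.Dict.nodup_keys_empty)

lemma pv_nodup_B (user : String) (friends : List (String × String)) (visitors : List String) :
    (pvDictB user friends visitors).keys.Nodup := by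
  unfold pvDictB
  exact pv_bumpFold_nodup _ _ _ (pv_bumpFold_nodup _ _ _ PySem.Dict.nodup_keys_empty)

-- sorted2 with linear-order keys is sorted with the lexicographic key
lemma pv_sorted2_eq_sorted_lex (xs : List (String × Int)) :
    PySem.List.sorted2 xs (fun x => -x.2) (fun x => x.1)
      = PySem.List.sorted xs (fun x => (toLex (-x.2, x.1) : Lex (Int × String))) := by
  rw [PySem.List.sorted_eq_foldl_insertBy]
  unfold PySem.List.sorted2
  simp only [if_neg (by simp : ¬(false = true))]
  congr 1
  funext acc x
  congr 1
  funext a b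
  rcases lt_trichotomy (-a.2) (-b.2) with h | h | h
  · simp [h, Prod.Lex.lt_iff, not_lt_of_gt h]
  · simp [h, Prod.Lex.lt_iff]
  · simp [Prod.Lex.lt_iff, not_lt_of_gt h,
      (show a.2 < b.2 by omega), (show ¬(a.2 = b.2) by omega)]

lemma pv_key_inj :
    Function.Injective (fun x : String × Int => (toLex (-x.2, x.1) : Lex (Int × String))) := by
  intro a b h
  have h' : ((-a.2, a.1) : Int × String) = (-b.2, b.1) := h
  have h1 : a.1 = b.1 := congrArg Prod.snd h'
  have h2 : -a.2 = -b.2 := congrArg Prod.fst h'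
  have h2' : a.2 = b.2 := by omega
  exact Prod.ext h1 h2'

-- membership in the filtered item lists
lemma pv_mem_filter_items (d : PySem.Dict String Int) (hnd : d.keys.Nodup)
    (cond : String × Int → Bool) (x : String × Int) :
    x ∈ d.items.filter cond ↔ (cond x = true ∧ d.get? x.1 = some x.2) := by
  rw [List.mem_filter]
  constructor
  · rintro ⟨hm, hc⟩
    refine ⟨hc, ?_⟩
    rw [PySem.Dict.get?_eq_some_iff_mem_items d x.1 x.2 hnd]
    simpa using hm
  · rintro ⟨hc, hg⟩
    refine ⟨?_, hc⟩
    have := (PySem.Dict.get?_eq_some_iff_mem_items d x.1 x.2 hnd).mp hg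
    simpa using this

lemma pv_nodup_items (d : PySem.Dict String Int) (hnd : d.keys.Nodup) : d.items.Nodup := by
  have : d.items.map Prod.fst = d.keys := by
    simp [PySem.Dict.keys]
  exact List.Nodup.of_map Prod.fst (by rw [this]; exact hnd)

-- the main equality
theorem pv_main (user : String) (friends : List (String × String)) (visitors : List String) :
    solution user friends visitors = solution_alt user friends visitors := by
  unfold solution solution_alt
  rw [pv_ufA, pv_adjB]
  dsimp only
  rw [pv_adj_getD]
  rw [show ((pvEdges friends).filter (fun e => e.1 == user)).map (fun e => e.2)
        = pvUF user friends from rfl]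
  rw [pv_scoreA, pv_visA, pv_scoreB, pv_visB]
  rw [show (pvInstrV (pvUF user friends) visitors).foldl (pvBump 1)
        ((pvInstrA user (pvUF user friends) friends).foldl (pvBump 10) PySem.Dict.empty)
        = pvDictA user friends visitors from rfl]
  rw [show (pvInstrV (pvUF user friends) visitors).foldl (pvBump 1)
        ((pvInstrB user (PySem.List.dedup (pvUF user friends)) friends).foldl (pvBump 10)
          PySem.Dict.empty)
        = pvDictB user friends visitors from rfl]
  set U := pvUF user friends with hUdef
  set cond : String × Int → Bool := fun p => !(U.contains p.1) && p.1 != user with hcond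
  set IA := (pvDictA user friends visitors).items.filter cond with hIA
  set IB := (pvDictB user friends visitors).items.filter cond with hIB
  -- the rebuilt dict of A has exactly the filtered items
  have hfreshnodup : (IA.map Prod.fst).Nodup := by
    have hsub : List.Sublist (IA.map Prod.fst)
        ((pvDictA user friends visitors).items.map Prod.fst) :=
      List.Sublist.map Prod.fst List.filter_sublist
    have : (pvDictA user friends visitors).items.map Prod.fst
        = (pvDictA user friends visitors).keys := by simp [PySem.Dict.keys]
    exact List.Sublist.nodup hsub (by rw [this]; exact pv_nodup_A user friends visitors)
  have hrebuild : (IA.foldl (fun d p => d.insert p.1 p.2)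
      (PySem.Dict.empty : PySem.Dict String Int)).items = IA := by
    have h1 := PySem.Dict.items_foldl_insert_fresh IA Prod.fst Prod.snd
      (PySem.Dict.empty : PySem.Dict String Int)
      (by intro a _; simp [PySem.Dict.contains_eq_isSome_get?, PySem.Dict.get?_empty])
      hfreshnodup
    have h2 : (PySem.Dict.empty : PySem.Dict String Int).items = [] := rfl
    simpa [h2] using h1
  rw [hrebuild]
  -- the score-positivity filter of A keeps everything
  have htop : IA.foldl (fun acc p => if 0 < p.2 then acc ++ [(p.1, p.2)] else acc) [] = IA := by
    have hfi : List.foldl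
        (fun (acc : List (String × Int)) (p : String × Int) =>
          if decide (0 < p.2) = true then acc ++ [(p.1, p.2)] else acc)
        ([] : List (String × Int)) IA
        = [] ++ (IA.filter (fun p => decide (0 < p.2))).map (fun p => (p.1, p.2)) :=
      PySem.List.foldl_append_if _ _ _ _
    rw [show (fun (acc : List (String × Int)) (p : String × Int) =>
          if 0 < p.2 then acc ++ [(p.1, p.2)] else acc)
        = (fun (acc : List (String × Int)) (p : String × Int) =>
          if decide (0 < p.2) = true then acc ++ [(p.1, p.2)] else acc) by
      funext acc p; simp]
    rw [hfi]
    have hall : IA.filter (fun p => decide (0 < p.2)) = IA := by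
      rw [List.filter_eq_self]
      intro p hp
      have hmem := (pv_mem_filter_items (pvDictA user friends visitors)
        (pv_nodup_A user friends visitors) cond p).mp (by rw [hIA] at hp; exact hp)
      simpa using pv_pos_A user friends visitors p.1 p.2 hmem.2
    rw [hall]
    simp
  rw [htop]
  -- the two candidate lists are permutations of each other
  have hperm : IA.Perm IB := by
    rw [List.perm_ext_iff_of_nodup
      ((pv_nodup_items _ (pv_nodup_A user friends visitors)).filter cond)
      ((pv_nodup_items _ (pv_nodup_B user friends visitors)).filter cond)]
    intro x
    rw [pv_mem_filter_items _ (pv_nodup_A user friends visitors) cond x,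
      pv_mem_filter_items _ (pv_nodup_B user friends visitors) cond x,
      pv_get?_AB user friends visitors x.1]
  -- hence the sorted lists agree
  rw [pv_sorted2_eq_sorted_lex, pv_sorted2_eq_sorted_lex]
  rw [PySem.List.sorted_eq_sorted_of_perm IA IB _ pv_key_inj hperm]

-- ===== VERDICT (by name: the statement is the Claim_ definition above) =====
theorem solution_spec : Claim_equal_solution := by
  intro user friends visitors _
  unfold Spec_solution
  exact pv_main user friends visitors
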